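-- pv_equiv track=rewrite | github.com/AAedionfree/Recommend | utility/fileName2Index.py | fileName2Index
-- ===== SOURCE A (Python) =====
-- def fileName2Index(filenamme):
--     n = len(filenamme)
--     charIndex = filenamme[n-2:n]
--     ans = 0
--     for ch in charIndex:
--         ascii_value = ord(ch)
--         ans += ans * 26 + ascii_value - ord('a')
--     return ans
-- ===== SOURCE B (Python) =====
-- def fileName2Index(filenamme):
--     cs = filenamme[-2:]
--     k = len(cs)
--     return sum((ord(ch) - ord('a')) * 27 ** (k - 1 - i) for i, ch in enumerate(cs))
-- ===== Notes on version B (the rewrite author's own statement) =====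
-- stated objective: alternative
-- what changed: Replaces the Horner-style running accumulator (ans += ans*26 + ...) over an explicit slice [n-2:n] with a direct positional-weight sum: each of the (at most two) last characters contributes (ord(ch)-97)*27^weight, summed in one expression.
import Mathlib
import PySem

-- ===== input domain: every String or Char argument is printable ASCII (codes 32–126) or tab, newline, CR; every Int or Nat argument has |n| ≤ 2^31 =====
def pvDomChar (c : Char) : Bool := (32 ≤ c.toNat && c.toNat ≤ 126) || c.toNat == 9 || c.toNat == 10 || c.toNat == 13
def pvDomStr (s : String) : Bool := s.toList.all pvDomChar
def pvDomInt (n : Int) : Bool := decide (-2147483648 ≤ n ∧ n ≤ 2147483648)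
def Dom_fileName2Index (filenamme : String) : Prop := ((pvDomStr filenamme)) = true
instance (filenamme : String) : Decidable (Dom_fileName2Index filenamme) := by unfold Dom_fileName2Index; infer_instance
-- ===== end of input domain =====

-- B replaces A's Horner-style accumulator over the slice [n-2:n] with a direct
-- positional-weight sum over the last two characters (objective: alternative).

-- ===== PORT A =====
def fileName2Index (filenamme : String) : Int :=
  let n : Int := PySem.Str.len filenamme
  let charIndex := PySem.List.slice filenamme.toList (some (n - 2)) (some n)
  charIndex.foldl (fun ans ch => ans + (ans * 26 + (ch.toNat : Int) - 97)) 0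

-- ===== PORT B =====
def fileName2Index_alt (filenamme : String) : Int :=
  let cs := PySem.List.slice filenamme.toList (some (-2)) none
  let k : Int := cs.length
  ((PySem.List.enumerate cs 0).map
    (fun p => ((p.2.toNat : Int) - 97) * 27 ^ (k - 1 - p.1).toNat)).sum

-- ===== PRECONDITION & SPEC =====
def Spec_fileName2Index (filenamme : String) (out : Int) : Prop := out = fileName2Index_alt filenamme
instance (filenamme : String) (out : Int) : Decidable (Spec_fileName2Index filenamme out) := by unfold Spec_fileName2Index; infer_instance

-- ===== CLAIM (what is proved, stated in full; the proofs are below) =====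
def Claim_equal_fileName2Index : Prop := ∀ (filenamme : String), Dom_fileName2Index filenamme → Spec_fileName2Index filenamme (fileName2Index filenamme)

-- ===== LEMMAS AND PROOFS =====

-- The two slice expressions pick the same suffix (the last min 2 chars).
lemma slices_eq (l : List Char) :
    PySem.List.slice l (some ((l.length : Int) - 2)) (some (l.length : Int))
      = PySem.List.slice l (some (-2)) none := by
  match l with
  | [] => decide
  | [a] =>
    simp [PySem.List.slice, PySem.List.clampIdx]
  | a :: b :: t =>
    have h2 : (1 : Nat) < 2 := by omega
    rw [PySem.List.slice_from_neg_ofNat (a :: b :: t) 2 h2]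
    have hc : ((a :: b :: t).length : Int) - 2 = (((a :: b :: t).length - 2 : Nat) : Int) := by
      simp; omega
    rw [hc, PySem.List.slice_toNat (ha := by positivity) (hb := by positivity)]
    simp only [Int.toNat_natCast]
    exact List.take_of_length_le (by simp)

-- On any list of length ≤ 2, A's fold equals B's positional sum.
lemma core_eq (cs : List Char) (h : cs.length ≤ 2) :
    cs.foldl (fun ans ch => ans + (ans * 26 + (ch.toNat : Int) - 97)) 0
      = ((PySem.List.enumerate cs 0).map
          (fun p => ((p.2.toNat : Int) - 97) * 27 ^ (((cs.length : Int)) - 1 - p.1).toNat)).sum := by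
  match cs with
  | [] => simp [PySem.List.enumerate]
  | [a] => simp [PySem.List.enumerate]
  | [a, b] =>
    simp [PySem.List.enumerate]
    ring
  | a :: b :: c :: t => simp at h

-- ===== VERDICT (by name: the statement is the Claim_ definition above) =====
theorem fileName2Index_spec : Claim_equal_fileName2Index := by
  intro s _
  unfold Spec_fileName2Index fileName2Index fileName2Index_alt
  simp only [PySem.Str.len_eq]
  rw [slices_eq]
  exact core_eq _ (by
    rcases s.toList with _ | ⟨a, _ | ⟨b, t⟩⟩
    · simp [PySem.List.slice, PySem.List.clampIdx]
    · simp [PySem.List.slice, PySem.List.clampIdx]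
    · rw [PySem.List.slice_from_neg_ofNat _ 2 (by omega)]; simp; omega)
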